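-- pv_equiv track=rewrite | github.com/Andret0701/heuristic_tuner | magic_bitboards/generate_rook_bitboards.py | generate_rook_attack_table_entry
-- ===== SOURCE A (Python) =====
-- def position_to_uint64(x, y):
--     return 1 << (x + y * 8)
--
-- def generate_rook_attack_table_entry(x, y):
--     attack = 0
--     # North direction
--     for i in range(y + 1, 7):  # Changed to 7 to exclude edge
--         attack |= position_to_uint64(x, i)
--
--     # South direction
--     for i in range(y - 1, 0, -1):  # Changed to stop at 0
--         attack |= position_to_uint64(x, i)
--
--     # East direction
--     for i in range(x + 1, 7):  # Changed to 7 to exclude edge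
--         attack |= position_to_uint64(i, y)
--
--     # West direction
--     for i in range(x - 1, 0, -1):  # Changed to stop at 0
--         attack |= position_to_uint64(i, y)
--
--     return attack
-- ===== SOURCE B (Python) =====
-- def ray(count, step, base):
--     # OR of `count` bits at positions base, base+step, ..., as one geometric mask
--     if count <= 0:
--         return 0
--     return (((1 << (step * count)) - 1) // ((1 << step) - 1)) << base
--
-- def generate_rook_attack_table_entry(x, y):
--     north = ray(6 - y, 8, x + 8 * (y + 1))
--     south = ray(y - 1, 8, x + 8)
--     east = ray(6 - x, 1, (x + 1) + 8 * y)
--     west = ray(x - 1, 1, 1 + 8 * y)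
--     return north | south | east | west
-- ===== Notes on version B (the rewrite author's own statement) =====
-- stated objective: faster
-- what changed: Replaces the four per-square accumulation loops by four loop-free geometric bit masks (((1<<(step*count))-1)//((1<<step)-1))<<base, one per ray, OR'd together.
import Mathlib
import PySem

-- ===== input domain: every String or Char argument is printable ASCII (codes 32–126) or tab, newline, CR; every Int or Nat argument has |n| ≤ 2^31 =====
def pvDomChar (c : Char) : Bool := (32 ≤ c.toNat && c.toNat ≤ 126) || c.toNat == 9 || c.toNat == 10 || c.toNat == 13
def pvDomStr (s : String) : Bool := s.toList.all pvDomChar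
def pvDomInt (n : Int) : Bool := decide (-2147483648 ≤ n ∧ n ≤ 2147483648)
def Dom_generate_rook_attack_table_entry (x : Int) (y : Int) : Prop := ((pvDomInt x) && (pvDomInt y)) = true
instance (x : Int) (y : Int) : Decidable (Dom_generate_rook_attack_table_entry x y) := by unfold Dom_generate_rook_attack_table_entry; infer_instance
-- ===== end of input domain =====

-- B replaces A's four directional accumulation loops by four loop-free geometric bit masks OR'd together.
-- ===== PORT A =====
def position_to_uint64 (x : Int) (y : Int) : Int := 1 <<< (x + y * 8).toNat
  -- exact where the shift amount is nonnegative; Python raises ValueError on a negative amount (outside Pre_)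

def generate_rook_attack_table_entry (x : Int) (y : Int) : Int :=
  let attack : Int := 0
  -- North direction
  let attack := (PySem.List.pyRange (y + 1) 7 1).foldl (fun a i => PySem.Int.bor a (position_to_uint64 x i)) attack
  -- South direction
  let attack := (PySem.List.pyRange (y - 1) 0 (-1)).foldl (fun a i => PySem.Int.bor a (position_to_uint64 x i)) attack
  -- East direction
  let attack := (PySem.List.pyRange (x + 1) 7 1).foldl (fun a i => PySem.Int.bor a (position_to_uint64 i y)) attack
  -- West direction
  let attack := (PySem.List.pyRange (x - 1) 0 (-1)).foldl (fun a i => PySem.Int.bor a (position_to_uint64 i y)) attack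
  attack

-- ===== PORT B =====
-- OR of `count` bits at positions base, base+step, ..., as one geometric mask (shifts exact for nonneg amounts)
def ray (count : Int) (step : Int) (base : Int) : Int :=
  if count ≤ 0 then 0
  else (PySem.Int.floordiv ((1 <<< (step * count).toNat) - 1) ((1 <<< step.toNat) - 1)) <<< base.toNat

def generate_rook_attack_table_entry_alt (x : Int) (y : Int) : Int :=
  let north := ray (6 - y) 8 (x + 8 * (y + 1))
  let south := ray (y - 1) 8 (x + 8)
  let east := ray (6 - x) 1 ((x + 1) + 8 * y)
  let west := ray (x - 1) 1 (1 + 8 * y)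
  PySem.Int.bor (PySem.Int.bor (PySem.Int.bor north south) east) west

-- ===== PRECONDITION & SPEC =====
-- Pre_ is exactly the set of inputs on which the Python A returns normally: outside it some loop
-- reaches a negative shift amount and A raises ValueError (each conjunct says the corresponding
-- directional loop is empty or its smallest shift amount is nonnegative).
def Pre_generate_rook_attack_table_entry (x : Int) (y : Int) : Prop :=
  (5 < y ∨ 0 ≤ x + 8 * (y + 1)) ∧ (y < 2 ∨ 0 ≤ x + 8) ∧
  (5 < x ∨ 0 ≤ (x + 1) + 8 * y) ∧ (x < 2 ∨ 0 ≤ 1 + 8 * y)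
instance (x : Int) (y : Int) : Decidable (Pre_generate_rook_attack_table_entry x y) := by
  unfold Pre_generate_rook_attack_table_entry; infer_instance
def pvWitness_generate_rook_attack_table_entry : Int × Int := (3, 4)

def Spec_generate_rook_attack_table_entry (x : Int) (y : Int) (out : Int) : Prop := out = generate_rook_attack_table_entry_alt x y
instance (x : Int) (y : Int) (out : Int) : Decidable (Spec_generate_rook_attack_table_entry x y out) := by unfold Spec_generate_rook_attack_table_entry; infer_instance

-- ===== CLAIM (what is proved, stated in full; the proofs are below) =====
def Claim_equal_generate_rook_attack_table_entry : Prop := ∀ (x : Int) (y : Int), Dom_generate_rook_attack_table_entry x y → Pre_generate_rook_attack_table_entry x y → Spec_generate_rook_attack_table_entry x y (generate_rook_attack_table_entry x y)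

-- ===== LEMMAS AND PROOFS =====

-- run of n bits spaced s apart, starting at `base`, built bottom-up
def orRun (s : Nat) (base : Nat) : Nat → Nat
  | 0 => 0
  | n + 1 => 2 ^ base ||| orRun s (base + s) n

theorem lor_add_mul_two_pow (t : Nat) : ∀ a b : Nat, a < 2 ^ t → a ||| b * 2 ^ t = a + b * 2 ^ t := by
  induction t with
  | zero => intro a b h; interval_cases a; simp
  | succ t ih =>
    intro a b h
    have hb : b * 2 ^ (t + 1) = Nat.bit false (b * 2 ^ t) := by
      simp [Nat.bit_false_apply]; ring
    have ha : a = Nat.bit (a.testBit 0) (a / 2) := by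
      conv_lhs => rw [← Nat.bit_testBit_zero_shiftRight_one a]
      simp [Nat.shiftRight_succ, Nat.shiftRight_zero]
    have h2 : a / 2 < 2 ^ t := by
      have := Nat.pow_succ 2 t
      omega
    rw [hb]
    conv_lhs => rw [ha]
    rw [Nat.lor_bit, ih (a / 2) b h2]
    rcases Bool.eq_false_or_eq_true (a.testBit 0) with hbit | hbit <;>
      simp [hbit, Nat.bit_false_apply, Nat.bit_true_apply] <;>
      · conv_rhs => rw [ha]
        simp [hbit, Nat.bit_false_apply, Nat.bit_true_apply]
        ring

theorem orRun_snoc (s : Nat) : ∀ (n base : Nat), orRun s base (n + 1) = orRun s base n ||| 2 ^ (base + s * n) := by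
  intro n
  induction n with
  | zero => intro base; simp [orRun]
  | succ n ih =>
    intro base
    show 2 ^ base ||| orRun s (base + s) (n + 1) = orRun s base (n + 1) ||| 2 ^ (base + s * (n + 1))
    rw [ih (base + s)]
    have he : base + s + s * n = base + s * (n + 1) := by ring
    rw [he, ← Nat.lor_assoc]
    rfl

def gs (r : Nat) (n : Nat) : Nat := ∑ k ∈ Finset.range n, r ^ k

theorem gs_succ (r n : Nat) : gs r (n + 1) = 1 + r * gs r n := by
  unfold gs
  rw [Finset.sum_range_succ', Finset.mul_sum]
  simp [pow_succ, Nat.add_comm, Nat.mul_comm]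

theorem gs_mul (r : Nat) (h1 : 2 ≤ r) : ∀ n : Nat, gs r n * (r - 1) = r ^ n - 1 := by
  intro n
  induction n with
  | zero => simp [gs]
  | succ n ih =>
    rw [gs_succ]
    have hr1 : 1 ≤ r ^ n := Nat.one_le_pow _ _ (by omega)
    have hr2 : 1 ≤ r ^ (n + 1) := Nat.one_le_pow _ _ (by omega)
    zify [hr1, hr2, (by omega : 1 ≤ r)] at ih ⊢
    linear_combination (r : Int) * ih

theorem geom_div (r n : Nat) (h : 2 ≤ r) : (r ^ n - 1) / (r - 1) = gs r n := by
  rw [← gs_mul r h n]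
  exact Nat.mul_div_cancel _ (by omega)

theorem orRun_eq (s : Nat) (hs : 1 ≤ s) : ∀ (n base : Nat), orRun s base n = gs (2 ^ s) n * 2 ^ base := by
  intro n
  induction n with
  | zero => intro base; simp [orRun, gs]
  | succ n ih =>
    intro base
    show 2 ^ base ||| orRun s (base + s) n = gs (2 ^ s) (n + 1) * 2 ^ base
    rw [ih (base + s)]
    have hm : gs (2 ^ s) n * 2 ^ (base + s) = (gs (2 ^ s) n * 2 ^ s) * 2 ^ base := by
      rw [pow_add]; ring
    have hlt : 2 ^ base < 2 ^ (base + s) := Nat.pow_lt_pow_right (by omega) (by omega)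
    have := lor_add_mul_two_pow (base + s) (2 ^ base) (gs (2 ^ s) n) hlt
    rw [this, gs_succ]
    rw [pow_add]
    ring

theorem one_shiftLeft_int (k : Nat) : (1 : Int) <<< k = ((2 ^ k : Nat) : Int) := by
  simp [Int.shiftLeft_eq]

theorem natCast_shiftLeft_int (m k : Nat) : ((m : Int) <<< k) = ((m <<< k : Nat) : Int) := by
  simp [Int.shiftLeft_eq, Nat.shiftLeft_eq]

theorem bor_cast (a b : Nat) : PySem.Int.bor (a : Int) (b : Int) = ((a ||| b : Nat) : Int) := by
  simp

theorem fold_up (c m : Int) (hm : 0 < m) : ∀ (n : Nat) (st : Int) (acc : Nat), 0 ≤ c + st * m →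
    List.foldl (fun a i => PySem.Int.bor a ((1 : Int) <<< (c + i * m).toNat)) (acc : Int)
      (PySem.List.pyRange st (st + (n : Int)) 1)
      = ((acc ||| orRun m.toNat ((c + st * m).toNat) n : Nat) : Int) := by
  intro n
  induction n with
  | zero =>
    intro st acc _
    rw [show st + ((0 : Nat) : Int) = st by simp, PySem.List.pyRange_one_eq_nil le_rfl]
    simp [orRun]
  | succ n ih =>
    intro st acc hb
    rw [PySem.List.pyRange_one_cons (by push_cast; omega)]
    rw [List.foldl_cons]
    rw [one_shiftLeft_int, bor_cast]
    have hrange : st + ((n + 1 : Nat) : Int) = (st + 1) + (n : Int) := by push_cast; ring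
    rw [hrange]
    have hb' : 0 ≤ c + (st + 1) * m := by nlinarith
    rw [ih (st + 1) (acc ||| 2 ^ (c + st * m).toNat) hb']
    have hto : (c + (st + 1) * m).toNat = (c + st * m).toNat + m.toNat := by
      have : c + (st + 1) * m = (c + st * m) + m := by ring
      omega
    rw [hto]
    rw [Nat.lor_assoc]
    rfl

theorem fold_down (c m : Int) (hm : 0 < m) : ∀ (n : Nat) (st : Int) (acc : Nat), 0 ≤ c + (st - (n : Int) + 1) * m →
    List.foldl (fun a i => PySem.Int.bor a ((1 : Int) <<< (c + i * m).toNat)) (acc : Int)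
      (PySem.List.pyRange st (st - (n : Int)) (-1))
      = ((acc ||| orRun m.toNat ((c + (st - (n : Int) + 1) * m).toNat) n : Nat) : Int) := by
  intro n
  induction n with
  | zero =>
    intro st acc _
    rw [show st - ((0 : Nat) : Int) = st by simp, PySem.List.pyRange_neg_one_eq_nil le_rfl]
    simp [orRun]
  | succ n ih =>
    intro st acc hb
    rw [PySem.List.pyRange_neg_one_cons (by push_cast; omega)]
    rw [List.foldl_cons]
    rw [one_shiftLeft_int, bor_cast]
    have hrange : st - ((n + 1 : Nat) : Int) = (st - 1) - (n : Int) := by push_cast; ring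
    rw [hrange]
    have hbase : (st - 1) - (n : Int) + 1 = st - ((n + 1 : Nat) : Int) + 1 := by push_cast; ring
    have hb' : 0 ≤ c + ((st - 1) - (n : Int) + 1) * m := by rw [hbase]; exact hb
    rw [ih (st - 1) (acc ||| 2 ^ (c + st * m).toNat) hb']
    rw [hbase]
    have hk : c + st * m = (c + (st - ((n + 1 : Nat) : Int) + 1) * m) + ((m.toNat * n : Nat) : Int) := by
      have hmn : ((m.toNat * n : Nat) : Int) = m * (n : Int) := by
        push_cast [Int.toNat_of_nonneg (le_of_lt hm)]
        ring
      rw [hmn]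
      push_cast
      ring
    have hto : (c + st * m).toNat = (c + (st - ((n + 1 : Nat) : Int) + 1) * m).toNat + m.toNat * n := by
      omega
    rw [hto, orRun_snoc]
    rw [Nat.lor_comm (orRun _ _ n) _, ← Nat.lor_assoc]

theorem fold_up' (c m : Int) (hm : 0 < m) (n : Nat) (st : Int) (acc : Nat) (b : Nat)
    (h0 : 0 ≤ c + st * m) (hb : (c + st * m).toNat = b) :
    List.foldl (fun a i => PySem.Int.bor a ((1 : Int) <<< (c + i * m).toNat)) (acc : Int)
      (PySem.List.pyRange st (st + (n : Int)) 1)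
      = ((acc ||| orRun m.toNat b n : Nat) : Int) := by
  rw [← hb]; exact fold_up c m hm n st acc h0

theorem fold_down' (c m : Int) (hm : 0 < m) (n : Nat) (st : Int) (acc : Nat) (b : Nat)
    (h0 : 0 ≤ c + (st - (n : Int) + 1) * m) (hb : (c + (st - (n : Int) + 1) * m).toNat = b) :
    List.foldl (fun a i => PySem.Int.bor a ((1 : Int) <<< (c + i * m).toNat)) (acc : Int)
      (PySem.List.pyRange st (st - (n : Int)) (-1))
      = ((acc ||| orRun m.toNat b n : Nat) : Int) := by
  rw [← hb]; exact fold_down c m hm n st acc h0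

theorem ray_eq (step count base : Int) (hs : 1 ≤ step) (hc : 0 < count) :
    ray count step base = ((orRun step.toNat base.toNat count.toNat : Nat) : Int) := by
  unfold ray
  rw [if_neg (by omega)]
  have hsc : step * count = ((step.toNat * count.toNat : Nat) : Int) := by
    rw [Int.natCast_mul, Int.toNat_of_nonneg (by omega : (0 : Int) ≤ step),
      Int.toNat_of_nonneg (by omega : (0 : Int) ≤ count)]
  have hsc' : (step * count).toNat = step.toNat * count.toNat := by omega
  rw [hsc']
  have e1 : ((1 <<< (step.toNat * count.toNat) : Nat) : Int) - 1 = ((2 ^ (step.toNat * count.toNat) - 1 : Nat) : Int) := by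
    rw [Nat.one_shiftLeft]; push_cast [Nat.one_le_two_pow]; ring
  have e2 : ((1 <<< step.toNat : Nat) : Int) - 1 = ((2 ^ step.toNat - 1 : Nat) : Int) := by
    rw [Nat.one_shiftLeft]; push_cast [Nat.one_le_two_pow]; ring
  rw [e1, e2, PySem.Int.floordiv_natCast, natCast_shiftLeft_int]
  congr 1
  have hs1 : 1 ≤ step.toNat := by omega
  rw [Nat.shiftLeft_eq, orRun_eq step.toNat hs1, pow_mul]
  rw [geom_div (2 ^ step.toNat) count.toNat (by
    calc (2 : Nat) = 2 ^ 1 := by norm_num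
    _ ≤ 2 ^ step.toNat := Nat.pow_le_pow_right (by norm_num) hs1)]

-- ===== VERDICT (by name: the statement is the Claim_ definition above) =====
theorem generate_rook_attack_table_entry_spec : Claim_equal_generate_rook_attack_table_entry := by
  intro x y _ hpre
  obtain ⟨h1, h2, h3, h4⟩ := hpre
  unfold Spec_generate_rook_attack_table_entry
  simp only [generate_rook_attack_table_entry, generate_rook_attack_table_entry_alt,
    position_to_uint64]
  -- North piece
  obtain ⟨mN, hNf, hNr⟩ : ∃ m : Nat, (∀ acc : Nat,
      (PySem.List.pyRange (y + 1) 7 1).foldl (fun a i => PySem.Int.bor a ((1 : Int) <<< (x + i * 8).toNat)) (acc : Int) = ((acc ||| m : Nat) : Int))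
      ∧ ray (6 - y) 8 (x + 8 * (y + 1)) = (m : Int) := by
    by_cases hy : 5 < y
    · refine ⟨0, fun acc => ?_, ?_⟩
      · rw [PySem.List.pyRange_one_eq_nil (by omega)]; simp
      · unfold ray; rw [if_pos (by omega)]; simp
    · have hb : 0 ≤ x + 8 * (y + 1) := by rcases h1 with h | h; omega; omega
      refine ⟨orRun (8 : Int).toNat (x + 8 * (y + 1)).toNat (6 - y).toNat, fun acc => ?_, ?_⟩
      · have h7 : (7 : Int) = (y + 1) + (((6 - y).toNat : Nat) : Int) := by omega
        rw [h7, fold_up' x 8 (by omega) (6 - y).toNat (y + 1) acc ((x + 8 * (y + 1)).toNat) (by omega) (by omega)]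
      · exact ray_eq 8 (6 - y) (x + 8 * (y + 1)) (by omega) (by omega)
  -- South piece
  obtain ⟨mS, hSf, hSr⟩ : ∃ m : Nat, (∀ acc : Nat,
      (PySem.List.pyRange (y - 1) 0 (-1)).foldl (fun a i => PySem.Int.bor a ((1 : Int) <<< (x + i * 8).toNat)) (acc : Int) = ((acc ||| m : Nat) : Int))
      ∧ ray (y - 1) 8 (x + 8) = (m : Int) := by
    by_cases hy : y < 2
    · refine ⟨0, fun acc => ?_, ?_⟩
      · rw [PySem.List.pyRange_neg_one_eq_nil (by omega)]; simp
      · unfold ray; rw [if_pos (by omega)]; simp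
    · have hb : 0 ≤ x + 8 := by rcases h2 with h | h; omega; omega
      refine ⟨orRun (8 : Int).toNat (x + 8).toNat (y - 1).toNat, fun acc => ?_, ?_⟩
      · have h0 : (0 : Int) = (y - 1) - (((y - 1).toNat : Nat) : Int) := by omega
        rw [h0, fold_down' x 8 (by omega) (y - 1).toNat (y - 1) acc ((x + 8).toNat) (by omega) (by omega)]
      · exact ray_eq 8 (y - 1) (x + 8) (by omega) (by omega)
  -- East piece
  have heb : (fun (a : Int) i => PySem.Int.bor a ((1 : Int) <<< (i + y * 8).toNat))
      = (fun (a : Int) i => PySem.Int.bor a ((1 : Int) <<< (8 * y + i * 1).toNat)) := by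
    funext a i; ring_nf
  obtain ⟨mE, hEf, hEr⟩ : ∃ m : Nat, (∀ acc : Nat,
      (PySem.List.pyRange (x + 1) 7 1).foldl (fun a i => PySem.Int.bor a ((1 : Int) <<< (i + y * 8).toNat)) (acc : Int) = ((acc ||| m : Nat) : Int))
      ∧ ray (6 - x) 1 ((x + 1) + 8 * y) = (m : Int) := by
    by_cases hx : 5 < x
    · refine ⟨0, fun acc => ?_, ?_⟩
      · rw [PySem.List.pyRange_one_eq_nil (by omega)]; simp
      · unfold ray; rw [if_pos (by omega)]; simp
    · have hb : 0 ≤ (x + 1) + 8 * y := by rcases h3 with h | h; omega; omega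
      refine ⟨orRun (1 : Int).toNat ((x + 1) + 8 * y).toNat (6 - x).toNat, fun acc => ?_, ?_⟩
      · rw [heb]
        have h7 : (7 : Int) = (x + 1) + (((6 - x).toNat : Nat) : Int) := by omega
        rw [h7, fold_up' (8 * y) 1 (by omega) (6 - x).toNat (x + 1) acc (((x + 1) + 8 * y).toNat) (by omega) (by omega)]
      · exact ray_eq 1 (6 - x) ((x + 1) + 8 * y) (by omega) (by omega)
  -- West piece
  obtain ⟨mW, hWf, hWr⟩ : ∃ m : Nat, (∀ acc : Nat,
      (PySem.List.pyRange (x - 1) 0 (-1)).foldl (fun a i => PySem.Int.bor a ((1 : Int) <<< (i + y * 8).toNat)) (acc : Int) = ((acc ||| m : Nat) : Int))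
      ∧ ray (x - 1) 1 (1 + 8 * y) = (m : Int) := by
    by_cases hx : x < 2
    · refine ⟨0, fun acc => ?_, ?_⟩
      · rw [PySem.List.pyRange_neg_one_eq_nil (by omega)]; simp
      · unfold ray; rw [if_pos (by omega)]; simp
    · have hb : 0 ≤ 1 + 8 * y := by rcases h4 with h | h; omega; omega
      refine ⟨orRun (1 : Int).toNat (1 + 8 * y).toNat (x - 1).toNat, fun acc => ?_, ?_⟩
      · rw [heb]
        have h0 : (0 : Int) = (x - 1) - (((x - 1).toNat : Nat) : Int) := by omega
        rw [h0, fold_down' (8 * y) 1 (by omega) (x - 1).toNat (x - 1) acc ((1 + 8 * y).toNat) (by omega) (by omega)]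
      · exact ray_eq 1 (x - 1) (1 + 8 * y) (by omega) (by omega)
  have main : List.foldl (fun a i => PySem.Int.bor a ((1 : Int) <<< (i + y * 8).toNat))
      (List.foldl (fun a i => PySem.Int.bor a ((1 : Int) <<< (i + y * 8).toNat))
        (List.foldl (fun a i => PySem.Int.bor a ((1 : Int) <<< (x + i * 8).toNat))
          (List.foldl (fun a i => PySem.Int.bor a ((1 : Int) <<< (x + i * 8).toNat)) (((0 : Nat) : Int)) (PySem.List.pyRange (y + 1) 7 1))
          (PySem.List.pyRange (y - 1) 0 (-1)))
        (PySem.List.pyRange (x + 1) 7 1))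
      (PySem.List.pyRange (x - 1) 0 (-1))
      = PySem.Int.bor (PySem.Int.bor (PySem.Int.bor (ray (6 - y) 8 (x + 8 * (y + 1))) (ray (y - 1) 8 (x + 8))) (ray (6 - x) 1 ((x + 1) + 8 * y))) (ray (x - 1) 1 (1 + 8 * y)) := by
    rw [hNf 0, hSf (0 ||| mN), hEf ((0 ||| mN) ||| mS), hWf (((0 ||| mN) ||| mS) ||| mE)]
    rw [hNr, hSr, hEr, hWr, bor_cast, bor_cast, bor_cast]
    simp
  exact main
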